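-- pv_equiv track=rewrite | github.com/Wenzhao299/ProvablySecureSteganography | utils.py | dec32
-- ===== SOURCE A (Python) =====
-- def bits2int(bits):
--     res = 0
--     for i, bit in enumerate(bits):
--         res += bit*(2**i)
--     return res
--
-- enc32_itoc = ['\0', 'a', 'b', 'c', 'd', 'e', 'f', 'g', 'h', 'i', 'j', 'k', 'l', 'm', 'n', 'o', 'p', 'q', 'r', 's', 't', 'u', 'v', 'w', 'x', 'y', 'z', '.', ',', "'", '!', ' ']
--
-- def dec32(bits):
--     text = ''
--     for i in range(0, len(bits), 5):
--         c = enc32_itoc[bits2int(bits[i:i+5])]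
--         if c == '\0':
--             break
--         text += c
--     return text
-- ===== SOURCE B (Python) =====
-- def dec32(bits):
--     if not bits:
--         return ''
--     v = 0
--     for b in reversed(bits[:5]):
--         v = 2 * v + b
--     if v == 0:
--         return ''
--     c = chr(96 + v) if v <= 26 else ".,'! "[v - 27]
--     return c + dec32(bits[5:])
-- ===== Notes on version B (the rewrite author's own statement) =====
-- stated objective: alternative
-- what changed: B replaces A's index loop over range(0,len,5) with slicing, a 32-entry lookup table and an accumulating string by a table-free structural recursion: it consumes 5 bits off the front, evaluates the group with a Horner fold over the reversed chunk, maps values 1..26 to letters arithmetically via chr(96+v) (only the 5 punctuation marks are indexed from a tiny string), and prepends the character to the recursive decode of the rest.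
-- outside the precondition, e.g. on dec32([-1]): A returns ' ', B returns '_'; on dec32([0, 0, 0, 0, 0, 32]): A returns '', B returns ''
import Mathlib
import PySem

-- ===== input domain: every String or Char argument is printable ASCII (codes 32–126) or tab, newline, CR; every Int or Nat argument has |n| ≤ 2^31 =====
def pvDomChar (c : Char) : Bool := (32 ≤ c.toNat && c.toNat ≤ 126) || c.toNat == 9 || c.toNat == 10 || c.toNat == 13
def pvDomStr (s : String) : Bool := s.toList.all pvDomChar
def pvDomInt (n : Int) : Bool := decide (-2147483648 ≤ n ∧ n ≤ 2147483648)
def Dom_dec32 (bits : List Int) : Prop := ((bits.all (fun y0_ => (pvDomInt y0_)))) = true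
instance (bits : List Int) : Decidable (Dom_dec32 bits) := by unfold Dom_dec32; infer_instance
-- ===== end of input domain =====

-- B is a table-free structural recursion (Horner group value, arithmetic chr for letters)
-- instead of A's index loop over range with a lookup table; objective: alternative.

-- ===== PORT A =====
-- enc32_itoc: Python list of 1-char strings, held as the chars themselves
def pvTable : List Char :=
  ['\x00', 'a', 'b', 'c', 'd', 'e', 'f', 'g', 'h', 'i', 'j', 'k', 'l', 'm',
   'n', 'o', 'p', 'q', 'r', 's', 't', 'u', 'v', 'w', 'x', 'y', 'z', '.', ',', '\'', '!', ' ']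

-- bits2int: res = 0; for i, bit in enumerate(bits): res += bit*(2**i)
def pvBits2int (bits : List Int) : Int :=
  (PySem.List.enumerate bits 0).foldl (fun res p => res + p.2 * 2 ^ p.1.toNat) 0

-- the 'for i in range(0, len(bits), 5)' loop with its break, over the remaining indices
def pvDec32Go (bits : List Int) : List Int → List Char → List Char
  | [], text => text
  | j :: rest, text =>
    match PySem.List.pyGet? pvTable (pvBits2int (PySem.List.slice bits (some j) (some (j + 5)))) with
    | none => text   -- IndexError in Python; unreachable under Pre_dec32
    | some c => if c = '\x00' then text else pvDec32Go bits rest (text ++ [c])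

def dec32 (bits : List Int) : String :=
  String.ofList (pvDec32Go bits (PySem.List.pyRange 0 bits.length 5) [])

-- ===== PORT B =====
-- c = chr(96 + v) if v <= 26 else ".,'! "[v - 27]
def pvB2Char (v : Int) : Char :=
  if v ≤ 26 then Char.ofNat (96 + v).toNat   -- chr(96+v): exact whenever 0 ≤ 96+v (always under Pre_dec32)
  else (PySem.Str.pyGet? ".,'! " (v - 27)).getD ' '   -- none = IndexError; unreachable under Pre_dec32

def dec32_alt (bits : List Int) : String :=
  if h : bits = [] then ""
  else
    -- v = 0; for b in reversed(bits[:5]): v = 2*v + b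
    let v := (PySem.List.slice bits none (some 5)).reverse.foldl (fun v b => 2 * v + b) 0
    if v = 0 then ""
    else String.ofList [pvB2Char v] ++ dec32_alt (PySem.List.slice bits (some 5) none)
termination_by bits.length
decreasing_by
  have hp : 0 < bits.length := List.length_pos_iff.mpr h
  simp [PySem.List.slice_from]
  omega

-- ===== PRECONDITION & SPEC =====
-- little-endian value of one 5-entry group (used by Pre_ to state the in-range condition)
def pvNatVal (g : List Int) : Int := g.foldr (fun b acc => b + 2 * acc) 0

-- Pre_: every 5-entry group has value in 0..31, i.e. each group is a valid code of the
-- 32-character alphabet: outside it A indexes the table out of range (IndexError) or by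
-- Python's accidental negative-index wraparound, where B's arithmetic chr differs.
def Pre_dec32 (bits : List Int) : Prop :=
  ∀ k ∈ List.range ((bits.length + 4) / 5),
    0 ≤ pvNatVal ((bits.drop (5 * k)).take 5) ∧ pvNatVal ((bits.drop (5 * k)).take 5) ≤ 31
instance (bits : List Int) : Decidable (Pre_dec32 bits) := by unfold Pre_dec32; infer_instance
def pvWitness_dec32 : List Int := [1, 0, 0, 0, 0, 0, 1, 0, 0, 0]
def Spec_dec32 (bits : List Int) (out : String) : Prop := out = dec32_alt bits
instance (bits : List Int) (out : String) : Decidable (Spec_dec32 bits out) := by unfold Spec_dec32; infer_instance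

-- ===== CLAIM (what is proved, stated in full; the proofs are below) =====
def Claim_equal_dec32 : Prop := ∀ (bits : List Int), Dom_dec32 bits → Pre_dec32 bits → Spec_dec32 bits (dec32 bits)

-- ===== LEMMAS AND PROOFS =====

theorem pvSum_enumerate (g : List Int) : ∀ (s : Int), 0 ≤ s →
    ((PySem.List.enumerate g s).map (fun p => p.2 * 2 ^ p.1.toNat)).sum
      = 2 ^ s.toNat * pvNatVal g := by
  induction g with
  | nil => intro s _; simp [pvNatVal]
  | cons a g ih =>
    intro s hs
    rw [PySem.List.enumerate_cons]
    have h1 : (s + 1).toNat = s.toNat + 1 := by omega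
    simp only [List.map_cons, List.sum_cons, ih (s + 1) (by omega), h1, pvNatVal,
      List.foldr_cons]
    rw [pow_succ]
    ring

theorem pvBits2int_eq (g : List Int) : pvBits2int g = pvNatVal g := by
  rw [pvBits2int,
    PySem.List.foldl_add (PySem.List.enumerate g 0) (fun p => p.2 * 2 ^ p.1.toNat) 0,
    pvSum_enumerate g 0 le_rfl]
  simp

-- B's Horner loop over the reversed chunk computes the same group value
theorem pvHorner_eq (g : List Int) :
    g.reverse.foldl (fun v b => 2 * v + b) 0 = pvNatVal g := by
  rw [List.foldl_reverse]
  induction g with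
  | nil => simp [pvNatVal]
  | cons a g ih => simp only [List.foldr_cons, ih, pvNatVal]; ring

-- A's table lookup at value 1..31 is exactly B's arithmetic character
theorem pvLookup_eq_b2char (v : Int) (h1 : 1 ≤ v) (h2 : v ≤ 31) :
    PySem.List.pyGet? pvTable v = some (pvB2Char v) := by
  interval_cases v <;> decide

theorem pvLookup_zero : PySem.List.pyGet? pvTable 0 = some '\x00' := by decide

theorem pvB2Char_ne (v : Int) (h1 : 1 ≤ v) (h2 : v ≤ 31) : pvB2Char v ≠ '\x00' := by
  interval_cases v <;> decide

-- range(a, b, 5) peels its head when a < b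
theorem pvRange5_cons (a b : Int) (h : a < b) :
    PySem.List.pyRange a b 5 = a :: PySem.List.pyRange (a + 5) b 5 := by
  rw [PySem.List.pyRange_of_pos a b (by norm_num),
    PySem.List.pyRange_of_pos (a + 5) b (by norm_num)]
  have hn : (if a < b then ((b - a + 5 - 1) / 5).toNat else 0)
      = (if a + 5 < b then ((b - (a + 5) + 5 - 1) / 5).toNat else 0) + 1 := by
    split_ifs <;> omega
  rw [hn, List.range_succ_eq_map, List.map_cons, List.map_map]
  congr 1
  · simp
  · apply List.map_congr_left
    intro k _
    simp only [Function.comp_apply]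
    push_cast
    ring

theorem pvRange5_nil (a b : Int) (h : b ≤ a) : PySem.List.pyRange a b 5 = [] := by
  rw [PySem.List.pyRange_of_pos a b (by norm_num), if_neg (by omega)]
  simp

-- A's break-loop from chunk offset j equals B's recursive decode of bits.drop j
theorem pvGo_eq (bits : List Int) (hb : Pre_dec32 bits) :
    ∀ (n k : Nat) (text : List Char), (bits.length : Int) ≤ 5 * k + n →
    pvDec32Go bits (PySem.List.pyRange ((5 * k : Nat) : Int) bits.length 5) text
      = text ++ (dec32_alt (bits.drop (5 * k))).toList := by
  intro n
  induction n with
  | zero =>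
    intro k text hlen
    rw [pvRange5_nil _ bits.length (by push_cast; omega), List.drop_eq_nil_of_le (by omega)]
    rw [dec32_alt.eq_def]
    simp [pvDec32Go]
  | succ n ih =>
    intro k text hlen
    set j : Int := ((5 * k : Nat) : Int) with hj
    have hj0 : 0 ≤ j := by positivity
    have hjt : j.toNat = 5 * k := by omega
    by_cases hlt : j < (bits.length : Int)
    · -- set up the chunk and its value
      set g := PySem.List.slice bits (some j) (some (j + 5)) with hg
      have hgval : g = (bits.drop (5 * k)).take 5 := by
        rw [hg, PySem.List.slice_toNat bits hj0 (by omega), hjt]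
        congr 1
        omega
      -- the group's value is in range, by Pre_
      have hv := hb k (List.mem_range.mpr (by omega))
      rw [← hgval] at hv
      obtain ⟨hv0, hv31⟩ := hv
      -- the dropped tail is nonempty
      have hdne : bits.drop (5 * k) ≠ [] := by
        apply List.ne_nil_of_length_pos
        rw [List.length_drop]
        omega
      -- B's one-step unfolding
      have hBv : (PySem.List.slice (bits.drop (5 * k)) none (some 5)).reverse.foldl
          (fun v b => 2 * v + b) 0 = pvNatVal g := by
        have h5 : PySem.List.slice (bits.drop (5 * k)) none (some 5)
            = (bits.drop (5 * k)).take 5 := by simp [PySem.List.slice_to]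
        rw [h5, pvHorner_eq, ← hgval]
      have h5' : PySem.List.slice (bits.drop (5 * k)) (some 5) none
          = bits.drop (5 * (k + 1)) := by
        simp [PySem.List.slice_from, List.drop_drop, Nat.mul_succ, Nat.add_comm]
      rw [pvRange5_cons j bits.length hlt]
      by_cases hz : pvNatVal g = 0
      · -- null group: A breaks, B returns ""
        have hcA : PySem.List.pyGet? pvTable (pvBits2int g) = some '\x00' := by
          rw [pvBits2int_eq, hz]; exact pvLookup_zero
        rw [dec32_alt.eq_def]
        simp only [pvDec32Go]
        rw [← hg, hcA]
        simp [hdne, hBv, hz]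
      · -- ordinary character
        have hc : PySem.List.pyGet? pvTable (pvNatVal g) = some (pvB2Char (pvNatVal g)) :=
          pvLookup_eq_b2char _ (by omega) (by omega)
        have hcA : PySem.List.pyGet? pvTable (pvBits2int g) = some (pvB2Char (pvNatVal g)) := by
          rw [pvBits2int_eq]; exact hc
        have hcne : pvB2Char (pvNatVal g) ≠ '\x00' :=
          pvB2Char_ne _ (by omega) (by omega)
        rw [dec32_alt.eq_def]
        simp only [pvDec32Go]
        rw [← hg, hcA]
        simp only [hdne, reduceDIte, hBv, if_neg hz, if_neg hcne, h5']
        have hjc : j + 5 = ((5 * (k + 1) : Nat) : Int) := by rw [hj]; push_cast; ring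
        rw [hjc, ih (k + 1) (text ++ [pvB2Char (pvNatVal g)]) (by push_cast at hlen ⊢; omega)]
        simp
    · rw [pvRange5_nil j bits.length (by omega), List.drop_eq_nil_of_le (by omega)]
      rw [dec32_alt.eq_def]
      simp [pvDec32Go]

-- ===== VERDICT (by name: the statement is the Claim_ definition above) =====
theorem dec32_spec : Claim_equal_dec32 := by
  intro bits _ hpre
  show dec32 bits = dec32_alt bits
  have h := pvGo_eq bits hpre bits.length 0 [] (by simp)
  simp only [Nat.mul_zero, Nat.cast_zero, List.drop_zero, List.nil_append] at h
  rw [dec32, h]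
  simp
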